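-- pv_equiv track=rewrite | github.com/johlun99/AoC-2022 | day08/solution.py | countEdges
-- ===== SOURCE A (Python) =====
-- def countEdges(trees):
--     count = 0
--     for y in range(len(trees)):
--         for x in range(len(trees[y])):
--             if y == 0 or x == 0:
--                 count += 1
--             elif x == len(trees[y]) - 1:
--                 count += 1
--             elif y == len(trees) - 1:
--                 count += 1
--     return count
-- ===== SOURCE B (Python) =====
-- def countEdges(trees):
--     h = len(trees)
--     total = 0
--     for y, row in enumerate(trees):
--         if y == 0 or y == h - 1:
--             total += len(row)
--         else:
--             total += min(len(row), 2)
--     return total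
-- ===== Notes on version B (the rewrite author's own statement) =====
-- stated objective: faster
-- what changed: Replaces the nested per-cell loop by a single pass over the rows that adds a closed-form per-row contribution (full row length for first/last row, min(len,2) otherwise).
import Mathlib
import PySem

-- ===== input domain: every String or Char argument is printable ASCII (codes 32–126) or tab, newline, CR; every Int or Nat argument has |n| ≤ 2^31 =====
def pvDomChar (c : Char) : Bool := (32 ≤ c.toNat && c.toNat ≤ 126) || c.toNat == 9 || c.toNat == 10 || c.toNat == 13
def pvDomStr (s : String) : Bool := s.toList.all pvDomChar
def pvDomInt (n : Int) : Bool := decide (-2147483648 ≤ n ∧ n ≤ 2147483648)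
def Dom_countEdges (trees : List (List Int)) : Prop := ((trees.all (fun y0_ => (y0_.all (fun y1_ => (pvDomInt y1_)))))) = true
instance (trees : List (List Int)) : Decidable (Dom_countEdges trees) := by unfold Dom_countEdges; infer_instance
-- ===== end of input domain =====

-- B replaces A's nested per-cell loop by one pass over the rows adding a closed-form per-row contribution (faster).

-- ===== PORT A =====
def countEdges (trees : List (List Int)) : Int :=
  (PySem.List.pyRange 0 (trees.length : Int) 1).foldl (fun count y =>
    (PySem.List.pyRange 0 ((PySem.List.pyGetD trees y []).length : Int) 1).foldl (fun c x =>
      if y = 0 ∨ x = 0 then c + 1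
      else if x = ((PySem.List.pyGetD trees y []).length : Int) - 1 then c + 1
      else if y = (trees.length : Int) - 1 then c + 1
      else c) count) 0

-- ===== PORT B =====
def countEdges_alt (trees : List (List Int)) : Int :=
  let h := trees.length
  (PySem.List.enumerate trees 0).foldl (fun total yr =>
    if yr.1 = 0 ∨ yr.1 = (h : Int) - 1 then total + (yr.2.length : Int)
    else total + min (yr.2.length : Int) 2) 0

-- ===== PRECONDITION & SPEC =====
def Spec_countEdges (trees : List (List Int)) (out : Int) : Prop := out = countEdges_alt trees
instance (trees : List (List Int)) (out : Int) : Decidable (Spec_countEdges trees out) := by unfold Spec_countEdges; infer_instance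

-- ===== CLAIM (what is proved, stated in full; the proofs are below) =====
def Claim_equal_countEdges : Prop := ∀ (trees : List (List Int)), Dom_countEdges trees → Spec_countEdges trees (countEdges trees)

-- ===== LEMMAS AND PROOFS =====

-- A's inner loop over one row adds a closed-form contribution to the counter.
lemma inner_row (h y : Int) (n : Nat) (count : Int) :
    (PySem.List.pyRange 0 (n : Int) 1).foldl (fun c x =>
      if y = 0 ∨ x = 0 then c + 1
      else if x = (n : Int) - 1 then c + 1
      else if y = h - 1 then c + 1
      else c) count
    = count + (if y = 0 ∨ y = h - 1 then (n : Int) else min (n : Int) 2) := by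
  have hb : ∀ (c x : Int),
      (if y = 0 ∨ x = 0 then c + 1 else if x = (n : Int) - 1 then c + 1
       else if y = h - 1 then c + 1 else c)
      = c + (if (y = 0 ∨ x = 0) ∨ x = (n : Int) - 1 ∨ y = h - 1 then 1 else 0) := by
    intro c x; split_ifs <;> simp_all
  simp only [hb]
  rw [PySem.List.foldl_add]
  congr 1
  by_cases hy : y = 0 ∨ y = h - 1
  · rw [if_pos hy]
    rw [List.map_congr_left (g := fun _ => (1 : Int)) (fun x hx => by
      rcases hy with hy | hy
      · simp [hy]
      · simp [hy])]
    rw [PySem.List.sum_map_const_int, PySem.List.length_pyRange_one]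
    simp
  · rw [if_neg hy]
    push_neg at hy
    rw [List.map_congr_left (g := fun x => if x = 0 ∨ x = (n : Int) - 1 then (1 : Int) else 0)
      (fun x hx => by simp [hy.1, hy.2])]
    match n with
    | 0 => simp [PySem.List.pyRange_one_eq_nil]
    | 1 =>
      rw [show ((1 : Nat) : Int) = 0 + 1 by norm_num, PySem.List.pyRange_one_singleton]
      simp
    | (m + 2) =>
      rw [show (((m + 2 : Nat)) : Int) = ((m + 1 : Int)) + 1 by push_cast; ring,
        PySem.List.pyRange_one_succ_right (by omega),
        PySem.List.pyRange_one_cons (by omega),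
        List.map_append, List.map_cons, List.sum_append, List.sum_cons]
      have hmid : ∀ x ∈ PySem.List.pyRange (0 + 1 : Int) ((m : Int) + 1) 1,
          (if x = 0 ∨ x = (m : Int) + 1 + 1 - 1 then (1 : Int) else 0) = 0 := by
        intro x hx
        rw [PySem.List.mem_pyRange_one] at hx
        rw [if_neg (by omega)]
      rw [List.map_congr_left hmid]
      simp
      omega

theorem countEdges_eq_alt (trees : List (List Int)) : countEdges trees = countEdges_alt trees := by
  simp only [countEdges, countEdges_alt, inner_row,
    PySem.List.enumerate_eq_map_pyRange (d := ([] : List Int)), List.foldl_map]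
  apply PySem.List.foldl_congr_mem
  intro acc x hx
  split_ifs <;> rfl

-- ===== VERDICT (by name: the statement is the Claim_ definition above) =====
theorem countEdges_spec : Claim_equal_countEdges := by
  intro trees _
  exact countEdges_eq_alt trees
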